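-- pv_equiv track=rewrite | github.com/celikfatih/gre | ingestion/src/cleaners/header_footer_cleaner.py | _excise_span
-- ===== SOURCE A (Python) =====
-- def _excise_span(original: str, norm_start: int, norm_end: int) -> str:
--     """
--     Maps normalized start/end indices back to original string indices and removes the span.
--     """
--     norm_idx = 0
--     orig_start = -1
--     orig_end = -1
--
--     # Iterate original string to find mapping
--     for i, char in enumerate(original):
--         if char.isspace():
--             continue
--
--         # If we are at the start of the match
--         if norm_idx == norm_start:
--             orig_start = i
--
--         # Increment normalized index
--         norm_idx += 1
--
--         # If we just finished the match
--         if norm_idx == norm_end: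
--             orig_end = i + 1
--             break
--
--     if orig_start != -1 and orig_end != -1:
--         # Cut it out
--         return (original[:orig_start] + original[orig_end:]).strip()
--
--     return original
-- ===== SOURCE B (Python) =====
-- def _excise_span(original: str, norm_start: int, norm_end: int) -> str:
--     # Position table: original indices of the non-whitespace characters, then direct indexing.
--     positions = [i for i, c in enumerate(original) if not c.isspace()]
--     if 0 <= norm_start < norm_end <= len(positions):
--         orig_start = positions[norm_start]
--         orig_end = positions[norm_end - 1] + 1
--         return (original[:orig_start] + original[orig_end:]).strip()
--     return original
-- ===== Notes on version B (the rewrite author's own statement) =====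
-- stated objective: simpler
-- what changed: Replaces the stateful early-breaking scan (norm_idx counter, two sentinel -1 indices, break) by a position table of non-whitespace indices plus one bounds-checked direct lookup.
import Mathlib
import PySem

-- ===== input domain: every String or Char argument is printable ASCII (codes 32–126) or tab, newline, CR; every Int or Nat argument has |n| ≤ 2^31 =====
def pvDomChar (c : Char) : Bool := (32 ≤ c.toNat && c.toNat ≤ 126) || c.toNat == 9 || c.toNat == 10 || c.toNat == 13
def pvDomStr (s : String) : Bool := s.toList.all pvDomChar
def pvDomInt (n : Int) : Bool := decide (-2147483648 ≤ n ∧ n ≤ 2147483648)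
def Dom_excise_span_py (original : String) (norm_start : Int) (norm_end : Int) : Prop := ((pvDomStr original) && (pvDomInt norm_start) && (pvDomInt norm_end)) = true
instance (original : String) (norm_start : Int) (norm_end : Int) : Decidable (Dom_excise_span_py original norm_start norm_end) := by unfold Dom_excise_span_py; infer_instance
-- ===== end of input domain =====

-- B replaces A's stateful early-breaking scan (counter + two -1 sentinels + break) by a
-- position table of non-whitespace indices with one bounds-checked direct lookup (objective: simpler).

-- ===== PORT A =====
-- the for-loop of A: state (norm_idx = k, orig_start = s, orig_end = e), i the running index,
-- 'break' = returning the pair immediately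
def pvLoopA (ns ne : Int) : List Char → Int → Int → Int → Int → Int × Int
  | [], _, _, s, e => (s, e)
  | c :: rest, i, k, s, e =>
    if PySem.Chars.isspace c then pvLoopA ns ne rest (i+1) k s e
    else
      let s' := if k = ns then i else s
      if k + 1 = ne then (s', i + 1)
      else pvLoopA ns ne rest (i+1) (k+1) s' e

def excise_span_py (original : String) (norm_start : Int) (norm_end : Int) : String :=
  let cs := original.toList
  let p := pvLoopA norm_start norm_end cs 0 0 (-1) (-1)
  if p.1 ≠ -1 ∧ p.2 ≠ -1 then
    String.ofList (PySem.Chars.strip (PySem.List.slice cs none (some p.1) ++ PySem.List.slice cs (some p.2) none))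
  else original

-- ===== PORT B =====
-- the comprehension [i for i, c in enumerate(original) if not c.isspace()]
def pvPositions : List Char → Int → List Int
  | [], _ => []
  | c :: rest, i => if PySem.Chars.isspace c then pvPositions rest (i+1) else i :: pvPositions rest (i+1)

def excise_span_py_alt (original : String) (norm_start : Int) (norm_end : Int) : String :=
  let cs := original.toList
  let positions := pvPositions cs 0
  if 0 ≤ norm_start ∧ norm_start < norm_end ∧ norm_end ≤ (positions.length : Int) then
    let orig_start := (PySem.List.pyGet? positions norm_start).getD 0
    let orig_end := (PySem.List.pyGet? positions (norm_end - 1)).getD 0 + 1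
    String.ofList (PySem.Chars.strip (PySem.List.slice cs none (some orig_start) ++ PySem.List.slice cs (some orig_end) none))
  else original

-- ===== PRECONDITION & SPEC =====
def Spec_excise_span_py (original : String) (norm_start : Int) (norm_end : Int) (out : String) : Prop := out = excise_span_py_alt original norm_start norm_end
instance (original : String) (norm_start : Int) (norm_end : Int) (out : String) : Decidable (Spec_excise_span_py original norm_start norm_end out) := by unfold Spec_excise_span_py; infer_instance

-- ===== CLAIM (what is proved, stated in full; the proofs are below) =====
def Claim_equal_excise_span_py : Prop := ∀ (original : String) (norm_start : Int) (norm_end : Int), Dom_excise_span_py original norm_start norm_end → Spec_excise_span_py original norm_start norm_end (excise_span_py original norm_start norm_end)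

-- ===== LEMMAS AND PROOFS =====

-- number of non-whitespace characters the loop actually processes before stopping
def pvProc (ne : Int) (P : List Int) (k : Int) : Int :=
  if k < ne ∧ ne - k ≤ (P.length : Int) then ne - k else (P.length : Int)

lemma pvProc_nonneg (ne : Int) (P : List Int) (k : Int) : 0 ≤ pvProc ne P k := by
  unfold pvProc; split_ifs <;> omega

lemma pvProc_cons (ne : Int) (i : Int) (P : List Int) (k : Int) (hbr : k + 1 ≠ ne) :
    pvProc ne (i :: P) k = pvProc ne P (k+1) + 1 := by
  unfold pvProc
  simp only [List.length_cons]
  push_cast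
  split_ifs <;> omega

lemma pvLoopA_char (ns ne : Int) (cs : List Char) : ∀ (i k s : Int),
    pvLoopA ns ne cs i k s (-1) =
      (if k ≤ ns ∧ ns - k < pvProc ne (pvPositions cs i) k
         then (pvPositions cs i).getD (ns - k).toNat 0 else s,
       if k < ne ∧ ne - k ≤ ((pvPositions cs i).length : Int)
         then (pvPositions cs i).getD (ne - 1 - k).toNat 0 + 1 else -1) := by
  induction cs with
  | nil =>
    intro i k s
    simp only [pvLoopA, pvPositions, pvProc, List.length_nil, Nat.cast_zero]
    split_ifs <;> simp_all <;> omega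
  | cons c rest ih =>
    intro i k s
    by_cases hsp : PySem.Chars.isspace c
    · simp only [pvLoopA, hsp, if_true, pvPositions]
      exact ih (i+1) k s
    · have hP : pvPositions (c :: rest) i = i :: pvPositions rest (i+1) := by
        simp [pvPositions, hsp]
      by_cases hbr : k + 1 = ne
      · simp only [pvLoopA, hsp, Bool.false_eq_true, if_false, hP]
        rw [if_pos hbr]
        have hproc : pvProc ne (i :: pvPositions rest (i+1)) k = 1 := by
          unfold pvProc
          simp only [List.length_cons]
          push_cast
          split_ifs <;> omega
        rw [hproc]
        have hcond2 : k < ne ∧ ne - k ≤ ((i :: pvPositions rest (i+1)).length : Int) := by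
          simp only [List.length_cons]; push_cast; omega
        rw [if_pos hcond2]
        rw [show (ne - 1 - k).toNat = 0 from by omega, List.getD_cons_zero]
        refine Prod.ext ?_ rfl
        dsimp only
        by_cases hns : k = ns
        · rw [if_pos hns, if_pos (show k ≤ ns ∧ ns - k < 1 by omega)]
          rw [show (ns - k).toNat = 0 from by omega, List.getD_cons_zero]
        · rw [if_neg hns, if_neg (by omega)]
      · simp only [pvLoopA, hsp, Bool.false_eq_true, if_false, hP]
        rw [if_neg hbr]
        rw [ih (i+1) (k+1) (if k = ns then i else s), pvProc_cons ne i _ k hbr]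
        have hpn := pvProc_nonneg ne (pvPositions rest (i+1)) (k+1)
        refine Prod.ext ?_ ?_ <;> dsimp only
        · by_cases hns : k = ns
          · rw [if_neg (by omega), if_pos hns,
              if_pos (show k ≤ ns ∧ ns - k < pvProc ne (pvPositions rest (i+1)) (k+1) + 1 by omega)]
            rw [show (ns - k).toNat = 0 from by omega, List.getD_cons_zero]
          · by_cases hc : k + 1 ≤ ns ∧ ns - (k+1) < pvProc ne (pvPositions rest (i+1)) (k+1)
            · rw [if_pos hc,
                if_pos (show k ≤ ns ∧ ns - k < pvProc ne (pvPositions rest (i+1)) (k+1) + 1 by omega)]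
              rw [show (ns - k).toNat = (ns - (k+1)).toNat + 1 from by omega, List.getD_cons_succ]
            · rw [if_neg hc, if_neg hns, if_neg (by omega)]
        · by_cases hc : k + 1 < ne ∧ ne - (k+1) ≤ ((pvPositions rest (i+1)).length : Int)
          · rw [if_pos hc, if_pos (by simp only [List.length_cons]; push_cast; omega)]
            rw [show (ne - 1 - k).toNat = (ne - 1 - (k+1)).toNat + 1 from by omega, List.getD_cons_succ]
          · rw [if_neg hc, if_neg (by simp only [List.length_cons]; push_cast; omega)]

lemma pvPositions_getD_nonneg : ∀ (cs : List Char) (i : Int), 0 ≤ i →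
    ∀ m, 0 ≤ (pvPositions cs i).getD m 0 := by
  intro cs
  induction cs with
  | nil => intro i _ m; simp [pvPositions]
  | cons c rest ih =>
    intro i hi m
    by_cases hsp : PySem.Chars.isspace c
    · simp only [pvPositions, hsp, if_true]
      exact ih (i+1) (by omega) m
    · simp only [pvPositions, hsp, Bool.false_eq_true, if_false]
      cases m with
      | zero => simpa using hi
      | succ m' =>
        rw [List.getD_cons_succ]
        exact ih (i+1) (by omega) m'

-- ===== VERDICT (by name: the statement is the Claim_ definition above) =====
theorem excise_span_py_spec : Claim_equal_excise_span_py := by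
  intro original ns ne _
  unfold Spec_excise_span_py excise_span_py excise_span_py_alt
  dsimp only
  rw [pvLoopA_char ns ne original.toList 0 0 (-1)]
  dsimp only
  by_cases hC : 0 ≤ ns ∧ ns < ne ∧ ne ≤ ((pvPositions original.toList 0).length : Int)
  · obtain ⟨h0, h1, h2⟩ := hC
    have hproc : pvProc ne (pvPositions original.toList 0) 0 = ne := by
      unfold pvProc; split_ifs <;> omega
    have hs0 : (0:Int) ≤ (pvPositions original.toList 0).getD (ns - 0).toNat 0 :=
      pvPositions_getD_nonneg original.toList 0 (by omega) _
    have he0 : (0:Int) ≤ (pvPositions original.toList 0).getD (ne - 1 - 0).toNat 0 :=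
      pvPositions_getD_nonneg original.toList 0 (by omega) _
    rw [if_pos (show 0 ≤ ns ∧ ns - 0 < pvProc ne (pvPositions original.toList 0) 0 by
          rw [hproc]; omega),
        if_pos (show 0 < ne ∧ ne - 0 ≤ ((pvPositions original.toList 0).length : Int) by omega)]
    rw [if_pos ⟨by omega, by omega⟩, if_pos ⟨h0, h1, h2⟩]
    have hg1 : (PySem.List.pyGet? (pvPositions original.toList 0) ns).getD 0 =
        (pvPositions original.toList 0).getD (ns - 0).toNat 0 := by
      rw [PySem.List.pyGet?_of_nonneg _ h0, ← List.getD_eq_getElem?_getD]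
      congr 1
      omega
    have hg2 : (PySem.List.pyGet? (pvPositions original.toList 0) (ne - 1)).getD 0 =
        (pvPositions original.toList 0).getD (ne - 1 - 0).toNat 0 := by
      rw [PySem.List.pyGet?_of_nonneg _ (by omega : (0:Int) ≤ ne - 1), ← List.getD_eq_getElem?_getD]
      congr 1
      omega
    rw [hg1, hg2]
  · rw [if_neg hC]
    by_cases hE : 0 < ne ∧ ne - 0 ≤ ((pvPositions original.toList 0).length : Int)
    · have hproc : pvProc ne (pvPositions original.toList 0) 0 = ne - 0 := by
        unfold pvProc; rw [if_pos hE]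
      rw [if_pos hE,
          if_neg (show ¬(0 ≤ ns ∧ ns - 0 < pvProc ne (pvPositions original.toList 0) 0) by
            rw [hproc]; omega)]
      simp
    · rw [if_neg hE]
      simp
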